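-- pv_equiv track=rewrite | github.com/Lala-chick/problem-solving | 0816/롤케이크.py | roll_cake
-- ===== SOURCE A (Python) =====
-- def roll_cake(zero, non_zero, M):
--     ans = 0
--
--     for z in zero:
--         while z > 10:
--             z -= 10
--             ans += 1
--             M -= 1
--             if M == 0:
--                 if z == 10:
--                     return ans + 1
--                 return ans
--         if z == 10:
--             ans += 1
--
--     for nz in non_zero:
--         while nz >= 10:
--             nz -= 10
--             ans += 1
--             M -= 1
--             if M == 0:
--                 return ans
--
--     return ans
-- ===== SOURCE B (Python) =====
-- def roll_cake(zero, non_zero, M):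
--     # Budget-capped arithmetic: each value's cuts are computed with one
--     # division instead of repeated subtraction; M >= 1 is the budget of cuts.
--     ans = 0
--     for z in zero:
--         cuts = (z - 1) // 10 if z > 10 else 0
--         take = min(cuts, M)
--         z -= 10 * take
--         ans += take
--         M -= take
--         if z == 10:
--             ans += 1
--         if M == 0:
--             return ans
--     for nz in non_zero:
--         take = min(nz // 10 if nz >= 10 else 0, M)
--         ans += take
--         M -= take
--         if M == 0:
--             return ans
--     return ans
-- ===== Notes on version B (the rewrite author's own statement) =====
-- stated objective: alternative
-- what changed: Each inner while-loop (repeated subtraction of 10, one budget unit per step) is replaced by a single division per element with the cut count capped by the remaining budget; Pre_ restricts to positive budgets M >= 1, since for M <= 0 A's post-decrement check 'M == 0' never fires and it cuts without limit, a degenerate corner outside the natural budget domain.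
-- outside the precondition, e.g. on roll_cake([25], [], 0): A returns 2, B returns 0
import Mathlib
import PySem

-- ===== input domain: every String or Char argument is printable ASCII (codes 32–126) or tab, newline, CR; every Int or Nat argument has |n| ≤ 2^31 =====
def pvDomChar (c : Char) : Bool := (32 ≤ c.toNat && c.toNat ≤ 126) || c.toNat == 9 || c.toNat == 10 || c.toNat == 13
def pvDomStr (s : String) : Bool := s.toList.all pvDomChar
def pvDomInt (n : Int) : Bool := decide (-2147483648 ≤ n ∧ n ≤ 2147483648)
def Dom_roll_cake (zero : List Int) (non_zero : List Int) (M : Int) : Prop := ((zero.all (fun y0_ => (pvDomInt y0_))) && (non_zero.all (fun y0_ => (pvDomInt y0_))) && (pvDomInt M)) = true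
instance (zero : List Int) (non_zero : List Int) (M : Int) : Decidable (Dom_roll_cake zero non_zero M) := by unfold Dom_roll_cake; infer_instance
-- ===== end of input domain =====

-- B replaces each inner while-loop of A (repeated subtraction of 10, one budget unit per
-- step) by one division per element, capped by the remaining budget (alternative arithmetic
-- formulation; same return value on positive budgets).

-- ===== PORT A =====
-- inner 'while z > 10' loop: result is (early-return value if any, final z, ans, M)
def rcZLoop (z ans M : Int) : Option Int × Int × Int × Int :=
  if 10 < z then
    if M - 1 = 0 then
      if z - 10 = 10 then (some ((ans + 1) + 1), 0, 0, 0) else (some (ans + 1), 0, 0, 0)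
    else rcZLoop (z - 10) (ans + 1) (M - 1)
  else (none, z, ans, M)
  termination_by z.toNat
  decreasing_by omega

-- 'for z in zero' loop
def rcPhaseZ : List Int → Int → Int → Option Int × Int × Int
  | [], ans, M => (none, ans, M)
  | z :: rest, ans, M =>
    match rcZLoop z ans M with
    | (some r, _, _, _) => (some r, 0, 0)
    | (none, zf, ans', M') => rcPhaseZ rest (if zf = 10 then ans' + 1 else ans') M'

-- inner 'while nz >= 10' loop
def rcNZLoop (nz ans M : Int) : Option Int × Int × Int :=
  if 10 ≤ nz then
    if M - 1 = 0 then (some (ans + 1), 0, 0)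
    else rcNZLoop (nz - 10) (ans + 1) (M - 1)
  else (none, ans, M)
  termination_by nz.toNat
  decreasing_by omega

-- 'for nz in non_zero' loop
def rcPhaseNZ : List Int → Int → Int → Option Int × Int
  | [], ans, _ => (none, ans)
  | nz :: rest, ans, M =>
    match rcNZLoop nz ans M with
    | (some r, _, _) => (some r, 0)
    | (none, ans', M') => rcPhaseNZ rest ans' M'

def roll_cake (zero : List Int) (non_zero : List Int) (M : Int) : Int :=
  match rcPhaseZ zero 0 M with
  | (some r, _, _) => r
  | (none, ans, M') =>
    match rcPhaseNZ non_zero ans M' with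
    | (some r, _) => r
    | (none, ans') => ans'

-- ===== PORT B =====
-- 'for z in zero' loop of Source B
def rcAltZ : List Int → Int → Int → Option Int × Int × Int
  | [], ans, M => (none, ans, M)
  | z :: rest, ans, M =>
    let cuts := if 10 < z then PySem.Int.floordiv (z - 1) 10 else 0
    let take := min cuts M
    let z' := z - 10 * take
    let ans' := (ans + take) + (if z' = 10 then 1 else 0)
    let M' := M - take
    if M' = 0 then (some ans', 0, 0) else rcAltZ rest ans' M'

-- 'for nz in non_zero' loop of Source B
def rcAltNZ : List Int → Int → Int → Option Int × Int
  | [], ans, _ => (none, ans)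
  | nz :: rest, ans, M =>
    let take := min (if 10 ≤ nz then PySem.Int.floordiv nz 10 else 0) M
    if M - take = 0 then (some (ans + take), 0)
    else rcAltNZ rest (ans + take) (M - take)

def roll_cake_alt (zero : List Int) (non_zero : List Int) (M : Int) : Int :=
  match rcAltZ zero 0 M with
  | (some r, _, _) => r
  | (none, ans, M') =>
    match rcAltNZ non_zero ans M' with
    | (some r, _) => r
    | (none, ans') => ans'

-- ===== PRECONDITION & SPEC =====
-- Pre_ restricts to positive budgets M ≥ 1, the natural domain for a budget of cuts;
-- for M ≤ 0 A's post-decrement check 'M == 0' never fires and it cuts without limit,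
-- a degenerate corner B's budget-capped arithmetic does not reproduce.
def Pre_roll_cake (zero : List Int) (non_zero : List Int) (M : Int) : Prop := 1 ≤ M
instance (zero : List Int) (non_zero : List Int) (M : Int) : Decidable (Pre_roll_cake zero non_zero M) := by unfold Pre_roll_cake; infer_instance

def pvWitness_roll_cake : List Int × List Int × Int := ([25, 10, 3], [23, 7], 3)

def Spec_roll_cake (zero : List Int) (non_zero : List Int) (M : Int) (out : Int) : Prop := out = roll_cake_alt zero non_zero M
instance (zero : List Int) (non_zero : List Int) (M : Int) (out : Int) : Decidable (Spec_roll_cake zero non_zero M out) := by unfold Spec_roll_cake; infer_instance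

-- ===== CLAIM (what is proved, stated in full; the proofs are below) =====
def Claim_equal_roll_cake : Prop := ∀ (zero : List Int) (non_zero : List Int) (M : Int), Dom_roll_cake zero non_zero M → Pre_roll_cake zero non_zero M → Spec_roll_cake zero non_zero M (roll_cake zero non_zero M)

-- ===== LEMMAS AND PROOFS =====

-- step count of the inner loops, in closed form
def rcZSteps (z : Int) : Int := if 10 < z then PySem.Int.floordiv (z - 1) 10 else 0
def rcNZSteps (nz : Int) : Int := if 10 ≤ nz then PySem.Int.floordiv nz 10 else 0

lemma rcZSteps_nonneg (z : Int) : 0 ≤ rcZSteps z := by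
  unfold rcZSteps
  split_ifs with h
  · rw [PySem.Int.floordiv_eq_ediv_of_pos (by norm_num)]; omega
  · omega

lemma rcNZSteps_nonneg (nz : Int) : 0 ≤ rcNZSteps nz := by
  unfold rcNZSteps
  split_ifs with h
  · rw [PySem.Int.floordiv_eq_ediv_of_pos (by norm_num)]; omega
  · omega

lemma rcZSteps_pos (z : Int) (h : 10 < z) : 1 ≤ rcZSteps z := by
  unfold rcZSteps
  rw [if_pos h, PySem.Int.floordiv_eq_ediv_of_pos (by norm_num)]; omega

lemma rcZSteps_step (z : Int) (h : 10 < z) : rcZSteps z = rcZSteps (z - 10) + 1 := by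
  unfold rcZSteps
  rw [if_pos h, PySem.Int.floordiv_eq_ediv_of_pos (by norm_num)]
  by_cases h2 : (10:Int) < z - 10
  · rw [if_pos h2, PySem.Int.floordiv_eq_ediv_of_pos (by norm_num)]; omega
  · rw [if_neg h2]; omega

lemma rcNZSteps_pos (nz : Int) (h : 10 ≤ nz) : 1 ≤ rcNZSteps nz := by
  unfold rcNZSteps
  rw [if_pos h, PySem.Int.floordiv_eq_ediv_of_pos (by norm_num)]; omega

lemma rcNZSteps_step (nz : Int) (h : 10 ≤ nz) : rcNZSteps nz = rcNZSteps (nz - 10) + 1 := by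
  unfold rcNZSteps
  rw [if_pos h, PySem.Int.floordiv_eq_ediv_of_pos (by norm_num)]
  by_cases h2 : (10:Int) ≤ nz - 10
  · rw [if_pos h2, PySem.Int.floordiv_eq_ediv_of_pos (by norm_num)]; omega
  · rw [if_neg h2]; omega

lemma rcZLoop_closed (z ans M : Int) :
    rcZLoop z ans M =
      if 0 < M ∧ M ≤ rcZSteps z then
        (if z - 10 * M = 10 then (some (ans + M + 1), 0, 0, 0) else (some (ans + M), 0, 0, 0))
      else (none, z - 10 * rcZSteps z, ans + rcZSteps z, M - rcZSteps z) := by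
  induction z, ans, M using rcZLoop.induct with
  | case1 z ans M h hM0 hz =>
    have hM : M = 1 := by omega
    subst hM
    have hs1 := rcZSteps_pos z h
    rw [rcZLoop, if_pos h, if_pos hM0, if_pos hz,
        if_pos (⟨by omega, by omega⟩ : 0 < (1:Int) ∧ 1 ≤ rcZSteps z),
        if_pos (show z - 10 * 1 = 10 by omega)]
  | case2 z ans M h hM0 hz =>
    have hM : M = 1 := by omega
    subst hM
    have hs1 := rcZSteps_pos z h
    rw [rcZLoop, if_pos h, if_pos hM0, if_neg hz,
        if_pos (⟨by omega, by omega⟩ : 0 < (1:Int) ∧ 1 ≤ rcZSteps z),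
        if_neg (show ¬ z - 10 * 1 = 10 by intro hx; omega)]
  | case3 z ans M h hM0 ih =>
    have hs1 := rcZSteps_pos z h
    have hstep := rcZSteps_step z h
    have hnn := rcZSteps_nonneg (z - 10)
    rw [rcZLoop, if_pos h, if_neg hM0, ih]
    by_cases hc : 0 < M - 1 ∧ M - 1 ≤ rcZSteps (z - 10)
    · obtain ⟨hc1, hc2⟩ := hc
      rw [if_pos (⟨hc1, hc2⟩ : _ ∧ _), if_pos (⟨by omega, by omega⟩ : 0 < M ∧ M ≤ rcZSteps z)]
      have e0 : ans + 1 + (M - 1) = ans + M := by omega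
      by_cases hw : z - 10 - 10 * (M - 1) = 10
      · rw [if_pos hw, if_pos (show z - 10 * M = 10 by omega), e0]
      · rw [if_neg hw, if_neg (show ¬ z - 10 * M = 10 by intro hx; omega), e0]
    · have hc' : ¬ (0 < M ∧ M ≤ rcZSteps z) := by
        intro ⟨h1, h2⟩
        exact hc ⟨by omega, by omega⟩
      have e1 : z - 10 - 10 * rcZSteps (z - 10) = z - 10 * rcZSteps z := by omega
      have e2 : ans + 1 + rcZSteps (z - 10) = ans + rcZSteps z := by omega
      have e3 : M - 1 - rcZSteps (z - 10) = M - rcZSteps z := by omega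
      rw [if_neg hc, if_neg hc', e1, e2, e3]
  | case4 z ans M h =>
    have hs : rcZSteps z = 0 := by unfold rcZSteps; rw [if_neg h]
    rw [rcZLoop, if_neg h, if_neg (show ¬ (0 < M ∧ M ≤ rcZSteps z) by intro hx; omega), hs]
    norm_num

lemma rcNZLoop_closed (nz ans M : Int) :
    rcNZLoop nz ans M =
      if 0 < M ∧ M ≤ rcNZSteps nz then (some (ans + M), 0, 0)
      else (none, ans + rcNZSteps nz, M - rcNZSteps nz) := by
  induction nz, ans, M using rcNZLoop.induct with
  | case1 nz ans M h hM0 =>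
    have hM : M = 1 := by omega
    subst hM
    have hs1 := rcNZSteps_pos nz h
    rw [rcNZLoop, if_pos h, if_pos hM0,
        if_pos (⟨by omega, by omega⟩ : 0 < (1:Int) ∧ 1 ≤ rcNZSteps nz)]
  | case2 nz ans M h hM0 ih =>
    have hs1 := rcNZSteps_pos nz h
    have hstep := rcNZSteps_step nz h
    have hnn := rcNZSteps_nonneg (nz - 10)
    rw [rcNZLoop, if_pos h, if_neg hM0, ih]
    by_cases hc : 0 < M - 1 ∧ M - 1 ≤ rcNZSteps (nz - 10)
    · obtain ⟨hc1, hc2⟩ := hc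
      have e0 : ans + 1 + (M - 1) = ans + M := by omega
      rw [if_pos (⟨hc1, hc2⟩ : _ ∧ _), if_pos (⟨by omega, by omega⟩ : 0 < M ∧ M ≤ rcNZSteps nz), e0]
    · have hc' : ¬ (0 < M ∧ M ≤ rcNZSteps nz) := by
        intro ⟨h1, h2⟩
        exact hc ⟨by omega, by omega⟩
      have e1 : ans + 1 + rcNZSteps (nz - 10) = ans + rcNZSteps nz := by omega
      have e2 : M - 1 - rcNZSteps (nz - 10) = M - rcNZSteps nz := by omega
      rw [if_neg hc, if_neg hc', e1, e2]
  | case3 nz ans M h =>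
    have hs : rcNZSteps nz = 0 := by unfold rcNZSteps; rw [if_neg h]
    rw [rcNZLoop, if_neg h, if_neg (show ¬ (0 < M ∧ M ≤ rcNZSteps nz) by intro hx; omega), hs]
    norm_num

lemma rcPhaseZ_alt (zs : List Int) : ∀ (ans M : Int), 1 ≤ M →
    rcPhaseZ zs ans M = rcAltZ zs ans M ∧
      (∀ ans' M', rcPhaseZ zs ans M = (none, ans', M') → 1 ≤ M') := by
  induction zs with
  | nil =>
    intro ans M hM
    refine ⟨rfl, ?_⟩
    intro ans' M' h
    simp [rcPhaseZ] at h
    omega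
  | cons z rest ih =>
    intro ans M hM
    have hsz := rcZSteps_nonneg z
    have hfold : (if 10 < z then PySem.Int.floordiv (z - 1) 10 else 0) = rcZSteps z := rfl
    rw [rcPhaseZ, rcAltZ, rcZLoop_closed]
    simp only [hfold]
    by_cases hc : M ≤ rcZSteps z
    · -- budget exhausted in this element: take = M
      have hmin : min (rcZSteps z) M = M := by omega
      rw [if_pos (⟨by omega, hc⟩ : 0 < M ∧ M ≤ rcZSteps z), hmin]
      rw [show M - M = (0:Int) by omega, if_pos rfl]
      refine ⟨?_, by intro a b h; split_ifs at h <;> simp_all⟩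
      by_cases hw : z - 10 * M = 10
      · rw [if_pos hw, if_pos hw]
      · rw [if_neg hw, if_neg hw]
        norm_num
    · -- element fully cut: take = rcZSteps z, budget stays ≥ 1
      have hmin : min (rcZSteps z) M = rcZSteps z := by omega
      have hM' : 1 ≤ M - rcZSteps z := by omega
      rw [if_neg (show ¬ (0 < M ∧ M ≤ rcZSteps z) by intro hx; omega), hmin,
          if_neg (show ¬ M - rcZSteps z = 0 by omega)]
      have hbonus : (if z - 10 * rcZSteps z = 10 then ans + rcZSteps z + 1 else ans + rcZSteps z)
          = (ans + rcZSteps z) + (if z - 10 * rcZSteps z = 10 then 1 else 0) := by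
        split_ifs <;> omega
      obtain ⟨ih1, ih2⟩ := ih ((ans + rcZSteps z) + (if z - 10 * rcZSteps z = 10 then 1 else 0)) (M - rcZSteps z) hM'
      constructor
      · show rcPhaseZ rest (if z - 10 * rcZSteps z = 10 then ans + rcZSteps z + 1 else ans + rcZSteps z) (M - rcZSteps z) = _
        rw [hbonus, ih1]
      · intro ans' M' h
        have h' : rcPhaseZ rest ((ans + rcZSteps z) + (if z - 10 * rcZSteps z = 10 then 1 else 0)) (M - rcZSteps z) = (none, ans', M') := by
          rw [← hbonus]; exact h
        exact ih2 ans' M' h'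

lemma rcPhaseNZ_alt (nzs : List Int) : ∀ (ans M : Int), 1 ≤ M →
    rcPhaseNZ nzs ans M = rcAltNZ nzs ans M := by
  induction nzs with
  | nil => intro ans M _; rfl
  | cons nz rest ih =>
    intro ans M hM
    have hsz := rcNZSteps_nonneg nz
    have hfold : (if 10 ≤ nz then PySem.Int.floordiv nz 10 else 0) = rcNZSteps nz := rfl
    rw [rcPhaseNZ, rcAltNZ, rcNZLoop_closed]
    simp only [hfold]
    by_cases hc : M ≤ rcNZSteps nz
    · have hmin : min (rcNZSteps nz) M = M := by omega
      rw [if_pos (⟨by omega, hc⟩ : 0 < M ∧ M ≤ rcNZSteps nz), hmin,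
          show M - M = (0:Int) by omega, if_pos rfl]
    · have hmin : min (rcNZSteps nz) M = rcNZSteps nz := by omega
      rw [if_neg (show ¬ (0 < M ∧ M ≤ rcNZSteps nz) by intro hx; omega), hmin,
          if_neg (show ¬ M - rcNZSteps nz = 0 by omega)]
      exact ih (ans + rcNZSteps nz) (M - rcNZSteps nz) (by omega)

-- ===== VERDICT (by name: the statement is the Claim_ definition above) =====
theorem roll_cake_spec : Claim_equal_roll_cake := by
  intro zero non_zero M _ hpre
  show roll_cake zero non_zero M = roll_cake_alt zero non_zero M
  unfold roll_cake roll_cake_alt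
  obtain ⟨h1, h2⟩ := rcPhaseZ_alt zero 0 M hpre
  rw [← h1]
  cases hz : rcPhaseZ zero 0 M with
  | mk r p =>
    cases r with
    | some v => rfl
    | none =>
      obtain ⟨ans, M'⟩ := p
      have hM' := h2 ans M' hz
      show (match rcPhaseNZ non_zero ans M' with
            | (some r, _) => r | (none, ans') => ans') = _
      rw [rcPhaseNZ_alt non_zero ans M' hM']
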